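-- pv_equiv track=rewrite | github.com/Topl/PoS-visualization | relative_margin.py | partial_sum_min
-- ===== SOURCE A (Python) =====
-- def partial_sum_min(w):
-- 	if w is None or w == "":
-- 		return [], []
--
-- 	n = len(w)
-- 	psum = [0] * (n+1)
-- 	pmin = [0] * (n+1)
--
-- 	# initial values
-- 	for i in range(n):
-- 		if w[i] == "1":
-- 			move = 1
-- 		else:
-- 			move = -1
-- 		psum[i+1] = psum[i] + move
-- 		pmin[i+1] = min(pmin[i], psum[i+1])
--
-- 	return psum, pmin
-- ===== SOURCE B (Python) =====
-- def _solve(cs):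
-- 	# divide & conquer: returns (psum, pmin) tables (length len(cs)+1) for the chunk cs
-- 	if len(cs) == 0:
-- 		return [0], [0]
-- 	if len(cs) == 1:
-- 		v = 1 if cs[0] == "1" else -1
-- 		return [0, v], [0, min(0, v)]
-- 	mid = len(cs) // 2
-- 	pl, ml = _solve(cs[:mid])
-- 	pr, mr = _solve(cs[mid:])
-- 	sL = pl[-1]
-- 	base = ml[-1]
-- 	psum = pl + [sL + x for x in pr[1:]]
-- 	pmin = ml + [min(base, sL + x) for x in mr[1:]]
-- 	return psum, pmin
--
--
-- def partial_sum_min(w):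
-- 	if w is None or w == "":
-- 		return [], []
-- 	return _solve(w)
-- ===== Notes on version B (the rewrite author's own statement) =====
-- stated objective: alternative
-- what changed: Replaces A's single left-to-right index loop with a divide-and-conquer recursion: the string is split in half, each half's (psum, pmin) tables are computed recursively, and the results are merged by offsetting the right half's tables by the left half's final sum and final minimum.
import Mathlib
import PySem

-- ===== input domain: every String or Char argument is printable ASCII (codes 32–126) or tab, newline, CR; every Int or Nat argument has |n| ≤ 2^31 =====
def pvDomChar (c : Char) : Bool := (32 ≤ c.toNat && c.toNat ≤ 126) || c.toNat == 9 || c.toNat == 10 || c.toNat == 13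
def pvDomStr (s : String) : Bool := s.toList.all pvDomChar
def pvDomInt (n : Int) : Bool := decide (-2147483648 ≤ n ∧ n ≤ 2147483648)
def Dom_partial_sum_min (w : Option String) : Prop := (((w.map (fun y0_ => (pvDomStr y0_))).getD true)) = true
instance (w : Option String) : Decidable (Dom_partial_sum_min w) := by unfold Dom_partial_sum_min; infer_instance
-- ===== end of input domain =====

-- B replaces A's single left-to-right loop by divide and conquer: split the string in half,
-- solve each half recursively, merge by offsetting the right half's tables; same result, O(n log n).

-- ===== PORT A =====
-- literal port: [0]*(n+1) becomes List.replicate (n+1) 0; the for-loop over range(n) is a foldl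
-- over pyRange carrying the two arrays, with pyGetD/pySetD for the (always in-range) index accesses.
def partial_sum_min (w : Option String) : List Int × List Int :=
  match w with
  | none => ([], [])
  | some s =>
    if s = "" then ([], [])
    else
      let cs := s.toList
      let n := cs.length
      let init : List Int × List Int := (List.replicate (n+1) 0, List.replicate (n+1) 0)
      (PySem.List.pyRange 0 (n : Int) 1).foldl (fun st i =>
        let move : Int := if PySem.List.pyGetD cs i ' ' = '1' then 1 else -1
        let psum1 := PySem.List.pySetD st.1 (i+1) (PySem.List.pyGetD st.1 i 0 + move)
        let pmin1 := PySem.List.pySetD st.2 (i+1)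
          (min (PySem.List.pyGetD st.2 i 0) (PySem.List.pyGetD psum1 (i+1) 0))
        (psum1, pmin1)) init

-- ===== PORT B =====
-- _solve of Source B: divide and conquer. cs[:mid]/cs[mid:] are List.take/drop (mid is in range),
-- pr[1:] is drop 1, and pl[-1]/ml[-1] are getLastD 0 (the tables are provably nonempty: they
-- always start with the leading 0, so [-1] is exactly the last element).
def pvSolve : List Char → List Int × List Int
  | [] => ([0], [0])
  | [c] =>
    let v : Int := if c = '1' then 1 else -1
    ([0, v], [0, min 0 v])
  | a :: b :: t =>
    let cs := a :: b :: t
    let mid := cs.length / 2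
    let l := pvSolve (cs.take mid)
    let r := pvSolve (cs.drop mid)
    let sL := l.1.getLastD 0
    let base := l.2.getLastD 0
    (l.1 ++ (r.1.drop 1).map (fun x => sL + x),
     l.2 ++ (r.2.drop 1).map (fun x => min base (sL + x)))
  termination_by cs => cs.length
  decreasing_by
    · simp only [List.length_take, List.length_cons]; omega
    · simp only [List.length_drop, List.length_cons]; omega

def partial_sum_min_alt (w : Option String) : List Int × List Int :=
  match w with
  | none => ([], [])
  | some s => if s = "" then ([], []) else pvSolve s.toList

-- ===== PRECONDITION & SPEC =====
def Spec_partial_sum_min (w : Option String) (out : List Int × List Int) : Prop := out = partial_sum_min_alt w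
instance (w : Option String) (out : List Int × List Int) : Decidable (Spec_partial_sum_min w out) := by unfold Spec_partial_sum_min; infer_instance

-- ===== CLAIM (what is proved, stated in full; the proofs are below) =====
def Claim_equal_partial_sum_min : Prop := ∀ (w : Option String), Dom_partial_sum_min w → Spec_partial_sum_min w (partial_sum_min w)

-- ===== LEMMAS AND PROOFS =====

-- pvMv: the move of one character; pvS cs k: prefix sum after k moves; pvF cs k: running min.
def pvMv (c : Char) : Int := if c = '1' then 1 else -1
def pvS (cs : List Char) (k : Nat) : Int := ((cs.take k).map pvMv).sum
def pvRunMin (g : Nat → Int) (a : Int) : Nat → Int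
  | 0 => a
  | k+1 => min (pvRunMin g a k) (g k)
def pvF (cs : List Char) (k : Nat) : Int := pvRunMin (fun t => pvS cs (t+1)) 0 k
-- the two arrays of A after j loop iterations
def pvP (h : Nat → Int) (n j : Nat) : List Int :=
  (List.range (n+1)).map (fun k => if k ≤ j then h k else 0)

theorem pvF_zero (cs : List Char) : pvF cs 0 = 0 := rfl
theorem pvF_succ (cs : List Char) (k : Nat) :
    pvF cs (k+1) = min (pvF cs k) (pvS cs (k+1)) := rfl

theorem pvS_succ (cs : List Char) (j : Nat) (hj : j < cs.length) :
    pvS cs (j+1) = pvS cs j + pvMv (cs.getD j ' ') := by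
  rw [pvS, pvS, List.take_add_one, List.map_append, List.sum_append]
  simp [List.getElem?_eq_getElem hj, List.getD_eq_getElem?_getD]

theorem pvP_getD (h : Nat → Int) (n j k : Nat) (hk : k < n + 1) :
    (pvP h n j).getD k 0 = (if k ≤ j then h k else 0) := by
  rw [pvP, List.getD_eq_getElem?_getD, List.getElem?_map, List.getElem?_range hk]
  rfl

theorem pvP_set (h : Nat → Int) (n j : Nat) (_hj : j < n) :
    (pvP h n j).set (j+1) (h (j+1)) = pvP h n (j+1) := by
  apply List.ext_getElem
  · simp [pvP]
  · intro k hk1 hk2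
    simp only [pvP, List.length_set, List.length_map, List.length_range] at hk1 hk2
    simp only [pvP, List.getElem_set, List.getElem_map, List.getElem_range]
    by_cases hkj : j + 1 = k
    · subst hkj
      rw [if_pos rfl, if_pos (le_refl _)]
    · rw [if_neg hkj]
      by_cases hle : k ≤ j
      · rw [if_pos hle, if_pos (by omega)]
      · rw [if_neg hle, if_neg (by omega)]

theorem pvP_zero (h : Nat → Int) (n : Nat) (h0 : h 0 = 0) :
    pvP h n 0 = List.replicate (n+1) 0 := by
  apply List.ext_getElem
  · simp [pvP]
  · intro k hk1 hk2
    simp only [pvP, List.getElem_map, List.getElem_range, List.getElem_replicate]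
    split_ifs with hle
    · have : k = 0 := Nat.le_zero.mp hle
      rw [this, h0]
    · rfl

theorem pvP_full (h : Nat → Int) (n : Nat) :
    pvP h n n = (List.range (n+1)).map h := by
  apply List.map_congr_left
  intro k hk
  rw [List.mem_range] at hk
  rw [if_pos (by omega)]

theorem pvGetD_set_self (l : List Int) (i : Nat) (v : Int) (h : i < l.length) :
    (l.set i v).getD i 0 = v := by
  rw [List.getD_eq_getElem?_getD, List.getElem?_set_self (by simpa using h)]
  rfl

-- the loop body of port A, named so the fold can be peeled one step at a time
def pvBody (cs : List Char) (st : List Int × List Int) (i : Int) : List Int × List Int :=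
  let move : Int := if PySem.List.pyGetD cs i ' ' = '1' then 1 else -1
  let psum1 := PySem.List.pySetD st.1 (i+1) (PySem.List.pyGetD st.1 i 0 + move)
  let pmin1 := PySem.List.pySetD st.2 (i+1)
    (min (PySem.List.pyGetD st.2 i 0) (PySem.List.pyGetD psum1 (i+1) 0))
  (psum1, pmin1)

theorem pvStep (cs : List Char) (j : Nat) (hj : j < cs.length) :
    pvBody cs (pvP (pvS cs) cs.length j, pvP (pvF cs) cs.length j) (j : Int)
      = (pvP (pvS cs) cs.length (j+1), pvP (pvF cs) cs.length (j+1)) := by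
  have hcast : ((j : Int) + 1) = ((j + 1 : Nat) : Int) := by push_cast; ring
  simp only [pvBody, hcast, PySem.List.pyGetD_natCast, PySem.List.pySetD_natCast]
  have hgP := pvP_getD (pvS cs) cs.length j j (by omega)
  have hgM := pvP_getD (pvF cs) cs.length j j (by omega)
  simp only [hgP, hgM, le_refl, if_pos]
  rw [← pvP_set (pvS cs) cs.length j hj, ← pvP_set (pvF cs) cs.length j hj]
  have hlen : j + 1 < (pvP (pvS cs) cs.length j).length := by
    simp only [pvP, List.length_map, List.length_range]
    omega
  congr 1
  · congr 1
    rw [pvS_succ cs j hj]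
    rfl
  · congr 1
    rw [pvGetD_set_self _ _ _ hlen]
    have hF : pvF cs (j+1) = min (pvF cs j) (pvS cs (j+1)) := rfl
    rw [hF]
    congr 1
    rw [pvS_succ cs j hj]
    rfl

theorem pvLoop (cs : List Char) (m j : Nat) (hm : j + m = cs.length) :
    (PySem.List.pyRange (j : Int) (cs.length : Int) 1).foldl (pvBody cs)
      (pvP (pvS cs) cs.length j, pvP (pvF cs) cs.length j)
      = (pvP (pvS cs) cs.length cs.length, pvP (pvF cs) cs.length cs.length) := by
  induction m generalizing j with
  | zero =>
    have : j = cs.length := by omega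
    subst this
    rw [PySem.List.pyRange_one_eq_nil (by omega)]
    rfl
  | succ m ih =>
    have hj : j < cs.length := by omega
    rw [PySem.List.pyRange_one_cons (by exact_mod_cast hj), List.foldl_cons, pvStep cs j hj]
    have hc : ((j : Int) + 1) = ((j + 1 : Nat) : Int) := by push_cast; ring
    rw [hc]
    exact ih (j+1) (by omega)

-- === B-side lemmas: the divide-and-conquer merge matches pvS / pvF on a concatenation ===

theorem pvS_append_le (l r : List Char) (k : Nat) (hk : k ≤ l.length) :
    pvS (l ++ r) k = pvS l k := by
  rw [pvS, pvS, List.take_append_of_le_length hk]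

theorem pvS_append_add (l r : List Char) (j : Nat) :
    pvS (l ++ r) (l.length + j) = pvS l l.length + pvS r j := by
  rw [pvS, pvS, pvS, List.take_append, List.take_of_length_le (Nat.le_add_right _ _),
    Nat.add_sub_cancel_left, List.map_append, List.sum_append, List.take_length]

theorem pvF_le_pvS (cs : List Char) (k : Nat) : pvF cs k ≤ pvS cs k := by
  cases k with
  | zero => simp [pvF_zero, pvS]
  | succ k => rw [pvF_succ]; exact min_le_right _ _

theorem pvF_append_le (l r : List Char) (k : Nat) (hk : k ≤ l.length) :
    pvF (l ++ r) k = pvF l k := by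
  induction k with
  | zero => rfl
  | succ k ih =>
    rw [pvF_succ, pvF_succ, ih (by omega), pvS_append_le l r (k+1) hk]

theorem pvF_append_add (l r : List Char) (j : Nat) :
    pvF (l ++ r) (l.length + j) = min (pvF l l.length) (pvS l l.length + pvF r j) := by
  induction j with
  | zero =>
    rw [Nat.add_zero, pvF_append_le l r l.length le_rfl, pvF_zero, add_zero]
    exact (min_eq_left (pvF_le_pvS l l.length)).symm
  | succ j ih =>
    rw [show l.length + (j+1) = (l.length + j) + 1 by omega, pvF_succ, ih,
      show (l.length + j) + 1 = l.length + (j+1) by omega, pvS_append_add, pvF_succ]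
    omega

-- last element and tail of a table (range (m+1)).map g
theorem pvTable_getLastD (g : Nat → Int) (m : Nat) :
    (((List.range (m+1)).map g).getLastD 0) = g m := by
  rw [List.range_succ, List.map_append]
  simp

theorem pvTable_drop_one (g : Nat → Int) (m : Nat) :
    ((List.range (m+1)).map g).drop 1 = (List.range m).map (fun j => g (j+1)) := by
  rw [List.range_succ_eq_map]
  simp [Function.comp_def]

-- merging the two halves' tables gives the whole string's tables
theorem pvMergeS (l r : List Char) :
    (List.range (l.length+1)).map (pvS l)
      ++ (((List.range (r.length+1)).map (pvS r)).drop 1).map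
           (fun x => ((List.range (l.length+1)).map (pvS l)).getLastD 0 + x)
    = (List.range ((l++r).length+1)).map (pvS (l++r)) := by
  rw [pvTable_getLastD, pvTable_drop_one, List.map_map]
  conv_rhs => rw [show (l++r).length + 1 = (l.length+1) + r.length by
      rw [List.length_append]; omega,
    List.range_add, List.map_append, List.map_map]
  congr 1
  · apply List.map_congr_left
    intro k hk
    rw [List.mem_range] at hk
    exact (pvS_append_le l r k (by omega)).symm
  · apply List.map_congr_left
    intro j _
    simp only [Function.comp_def]
    rw [show (l.length + 1) + j = l.length + (j+1) by omega, pvS_append_add]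

theorem pvMergeF (l r : List Char) :
    (List.range (l.length+1)).map (pvF l)
      ++ (((List.range (r.length+1)).map (pvF r)).drop 1).map
           (fun x => min (((List.range (l.length+1)).map (pvF l)).getLastD 0)
                         (((List.range (l.length+1)).map (pvS l)).getLastD 0 + x))
    = (List.range ((l++r).length+1)).map (pvF (l++r)) := by
  rw [pvTable_getLastD, pvTable_getLastD, pvTable_drop_one, List.map_map]
  conv_rhs => rw [show (l++r).length + 1 = (l.length+1) + r.length by
      rw [List.length_append]; omega,
    List.range_add, List.map_append, List.map_map]
  congr 1
  · apply List.map_congr_left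
    intro k hk
    rw [List.mem_range] at hk
    exact (pvF_append_le l r k (by omega)).symm
  · apply List.map_congr_left
    intro j _
    simp only [Function.comp_def]
    rw [show (l.length + 1) + j = l.length + (j+1) by omega, pvF_append_add]

-- characterization of the divide-and-conquer solver
theorem pvSolve_eq (cs : List Char) :
    pvSolve cs = ((List.range (cs.length+1)).map (pvS cs),
                  (List.range (cs.length+1)).map (pvF cs)) := by
  induction cs using pvSolve.induct with
  | case1 =>
    simp [pvSolve, pvS, pvF, pvRunMin, List.range_succ]
  | case2 c =>
    simp [pvSolve, pvF, pvRunMin, List.range_succ, pvS, pvMv]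
  | case3 a b t cs0 mid0 ihl ihr =>
    have ihl' := ihl
    have ihr' := ihr
    simp only [show mid0 = (a :: b :: t).length / 2 from rfl,
      show cs0 = a :: b :: t from rfl] at ihl' ihr'
    conv_lhs => rw [pvSolve]
    simp only [ihl', ihr']
    have hsplit := List.take_append_drop ((a :: b :: t).length / 2) (a :: b :: t)
    conv_rhs => rw [← hsplit]
    rw [Prod.mk.injEq]
    exact ⟨pvMergeS _ _, pvMergeF _ _⟩

-- ===== VERDICT (by name: the statement is the Claim_ definition above) =====
theorem partial_sum_min_spec : Claim_equal_partial_sum_min := by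
  unfold Claim_equal_partial_sum_min
  intro w _
  unfold Spec_partial_sum_min partial_sum_min partial_sum_min_alt
  match w with
  | none => rfl
  | some s =>
    by_cases hs : s = ""
    · simp [hs]
    · simp only [hs, if_false]
      show (PySem.List.pyRange 0 (s.toList.length : Int) 1).foldl (pvBody s.toList)
          (List.replicate (s.toList.length+1) 0, List.replicate (s.toList.length+1) 0) = _
      nth_rewrite 2 [← pvP_zero (pvF s.toList) s.toList.length rfl]
      nth_rewrite 1 [← pvP_zero (pvS s.toList) s.toList.length rfl]
      rw [show ((0 : Int)) = ((0 : Nat) : Int) from rfl, pvLoop s.toList s.toList.length 0 (by omega)]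
      try simp only [Nat.cast_zero]
      rw [pvP_full, pvP_full, pvSolve_eq s.toList]
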